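-- pv_equiv track=rewrite | github.com/k-harada/AtCoder | ABC/ABC251-300/ABC268/E.py | solve
-- ===== SOURCE A (Python) =====
-- def solve(n, p_list):
--     d_list = [0] * n
--     for i, p in enumerate(p_list):
--         d_list[(p - i) % n] += 1
--
--     if n % 2 == 0:
--         m = n // 2
--         r = 0
--         for i in range(m):
--             r += i * d_list[i]
--         for i in range(m, n):
--             r += (n - i) * d_list[i]
--         res = r
--
--         d = sum(d_list[:m])
--         for i in range(n):
--             r += 2 * d
--             r -= n
--             res = min(res, r)
--             d -= d_list[(m - i - 1) % n]
--             d += d_list[(- i - 1) % n]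
--
--     else:
--         m = n // 2
--         r = 0
--         for i in range(m + 1):
--             r += i * d_list[i]
--         for i in range(m + 1, n):
--             r += (n - i) * d_list[i]
--         res = r
--
--         d = 2 * sum(d_list[:m]) + d_list[m]
--         for i in range(n):
--             r += d
--             r -= n
--             res = min(res, r)
--             d -= d_list[(m - i - 1) % n]
--             d -= d_list[(m - i) % n]
--             d += 2 * d_list[(- i - 1) % n]
--
--     return res
-- ===== SOURCE B (Python) =====
-- def solve(n, p_list):
--     d_list = [0] * n
--     for i, p in enumerate(p_list):
--         d_list[(p - i) % n] += 1
--     pref = [0]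
--     for c in d_list:
--         pref.append(pref[-1] + c)
--
--     def wsum(s, h):
--         # sum of d_list over the circular window [s, s+h)
--         e = s + h
--         if e <= n:
--             return pref[e] - pref[s]
--         return pref[n] - pref[s] + pref[e - n]
--
--     r = sum(d_list[k] * min(k, n - k) for k in range(n))
--     best = r
--     for j in range(1, n + 1):
--         # one rotation step: each of the n dishes comes one seat closer in the
--         # naive count; a dish in the receding half-window moves away instead
--         s0 = (1 - j) % n
--         r += wsum(s0, (n + 1) // 2) + wsum(s0, n // 2) - n
--         best = min(best, r)
--     return best
-- ===== Notes on version B (the rewrite author's own statement) =====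
-- stated objective: alternative
-- what changed: Replaces A's incremental bookkeeping (separate even/odd code paths each maintaining a sliding half-window counter updated by two or three histogram reads per shift) with precomputed prefix sums of the histogram: each rotation step's adjustment is read directly as two circular window sums through a uniform formula, so the parity case split and the maintained counter disappear.
import Mathlib
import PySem

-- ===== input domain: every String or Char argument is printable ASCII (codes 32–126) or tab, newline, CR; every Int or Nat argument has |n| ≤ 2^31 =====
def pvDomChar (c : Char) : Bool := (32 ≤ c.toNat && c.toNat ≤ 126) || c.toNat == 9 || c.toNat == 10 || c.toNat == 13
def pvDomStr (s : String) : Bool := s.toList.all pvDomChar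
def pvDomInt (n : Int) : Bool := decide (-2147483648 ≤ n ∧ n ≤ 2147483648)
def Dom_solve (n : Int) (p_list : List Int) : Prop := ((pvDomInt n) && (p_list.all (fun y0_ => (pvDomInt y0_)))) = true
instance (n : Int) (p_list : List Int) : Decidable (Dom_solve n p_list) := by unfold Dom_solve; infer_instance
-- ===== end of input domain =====

-- B replaces A's even/odd-cased incremental sliding-window bookkeeping with prefix sums of
-- the histogram, reading each rotation step's adjustment as two circular window sums
-- (objective: alternative, same O(n) cost).

-- ===== PORT A =====

-- histogram build: d_list[(p - i) % n] += 1 over enumerate(p_list); the Python list with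
-- O(1) indexing is ported as Array Int (the written index is in range whenever n > 0;
-- where Python raises IndexError, Pre_ excludes the input)
def pvBump (n : Int) (dl : Array Int) (ip : Int × Int) : Array Int :=
  dl.setIfInBounds (PySem.Int.mod (ip.2 - ip.1) n).toNat
    (dl.getD (PySem.Int.mod (ip.2 - ip.1) n).toNat 0 + 1)

def pvBuild (n : Int) (p_list : List Int) : Array Int :=
  (PySem.List.enumerate p_list 0).foldl (pvBump n) (Array.replicate n.toNat 0)

-- loop body of A's even-n sliding window (state (r, res, d))
def pvStepE (dl : Array Int) (n m : Int) (st : Int × Int × Int) (i : Int) : Int × Int × Int :=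
  let r := st.1 + 2 * st.2.2 - n
  let res := min st.2.1 r
  let d := st.2.2 - dl.getD (PySem.Int.mod (m - i - 1) n).toNat 0
                  + dl.getD (PySem.Int.mod (-i - 1) n).toNat 0
  (r, res, d)

-- loop body of A's odd-n sliding window (state (r, res, d))
def pvStepO (dl : Array Int) (n m : Int) (st : Int × Int × Int) (i : Int) : Int × Int × Int :=
  let r := st.1 + st.2.2 - n
  let res := min st.2.1 r
  let d := st.2.2 - dl.getD (PySem.Int.mod (m - i - 1) n).toNat 0
                  - dl.getD (PySem.Int.mod (m - i) n).toNat 0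
                  + 2 * dl.getD (PySem.Int.mod (-i - 1) n).toNat 0
  (r, res, d)

def solve (n : Int) (p_list : List Int) : Int :=
  let d_list := pvBuild n p_list
  if PySem.Int.mod n 2 = 0 then
    let m := PySem.Int.floordiv n 2
    let r1 := (PySem.List.pyRange 0 m 1).foldl
      (fun r i => r + i * d_list.getD i.toNat 0) 0
    let r2 := (PySem.List.pyRange m n 1).foldl
      (fun r i => r + (n - i) * d_list.getD i.toNat 0) r1
    let d0 := (PySem.List.slice d_list.toList none (some m)).sum
    let fin := (PySem.List.pyRange 0 n 1).foldl (pvStepE d_list n m) (r2, r2, d0)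
    fin.2.1
  else
    let m := PySem.Int.floordiv n 2
    let r1 := (PySem.List.pyRange 0 (m + 1) 1).foldl
      (fun r i => r + i * d_list.getD i.toNat 0) 0
    let r2 := (PySem.List.pyRange (m + 1) n 1).foldl
      (fun r i => r + (n - i) * d_list.getD i.toNat 0) r1
    let d0 := 2 * (PySem.List.slice d_list.toList none (some m)).sum
              + d_list.getD m.toNat 0
    let fin := (PySem.List.pyRange 0 n 1).foldl (pvStepO d_list n m) (r2, r2, d0)
    fin.2.1

-- ===== PORT B =====

-- prefix sums of the histogram: pref.append(pref[-1] + c) over d_list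
def pvPref (dl : Array Int) : Array Int :=
  dl.foldl (fun acc c => acc.push (acc.getD (acc.size - 1) 0 + c)) #[0]

-- sum of d_list over the circular window [s, s+h), read off the prefix sums
def pvWsum (pref : Array Int) (n s h : Int) : Int :=
  let e := s + h
  if e ≤ n then pref.getD e.toNat 0 - pref.getD s.toNat 0
  else pref.getD n.toNat 0 - pref.getD s.toNat 0 + pref.getD (e - n).toNat 0

-- loop body of B's loop (state (best, r)): one rotation step
def pvStepB (pref : Array Int) (n : Int) (st : Int × Int) (j : Int) : Int × Int :=
  let s0 := PySem.Int.mod (1 - j) n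
  let r := st.2 + pvWsum pref n s0 (PySem.Int.floordiv (n + 1) 2)
               + pvWsum pref n s0 (PySem.Int.floordiv n 2) - n
  (min st.1 r, r)

def solve_alt (n : Int) (p_list : List Int) : Int :=
  let d_list := pvBuild n p_list
  let pref := pvPref d_list
  let r0 := ((PySem.List.pyRange 0 n 1).map
    (fun k => d_list.getD k.toNat 0 * min k (n - k))).sum
  let fin := (PySem.List.pyRange 1 (n + 1) 1).foldl (pvStepB pref n) (r0, r0)
  fin.1

-- ===== PRECONDITION & SPEC =====
-- Pre_ is exactly where the Python A returns normally: n > 0, or the degenerate n <= 0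
-- even case with an empty list (A raises IndexError on the remaining inputs).
def Pre_solve (n : Int) (p_list : List Int) : Prop :=
  0 < n ∨ (p_list = [] ∧ n % 2 = 0)
instance (n : Int) (p_list : List Int) : Decidable (Pre_solve n p_list) := by unfold Pre_solve; infer_instance
def pvWitness_solve : Int × List Int := (4, [2, 0, 3, 1])

def Spec_solve (n : Int) (p_list : List Int) (out : Int) : Prop := out = solve_alt n p_list
instance (n : Int) (p_list : List Int) (out : Int) : Decidable (Spec_solve n p_list out) := by unfold Spec_solve; infer_instance

-- ===== CLAIM (what is proved, stated in full; the proofs are below) =====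
def Claim_equal_solve : Prop := ∀ (n : Int) (p_list : List Int), Dom_solve n p_list → Pre_solve n p_list → Spec_solve n p_list (solve n p_list)

-- ===== LEMMAS AND PROOFS =====

-- periodic lookup in the histogram (index taken modulo the length)
def pvDp (d : List Int) (x : Int) : Int := d.getD (x % (d.length : Int)).toNat 0

-- cost of rotating by i (B computes pvC d (-s) at shift s; A's r-variable walks pvC d (-i))
def pvC (d : List Int) (i : Int) : Int :=
  ∑ t ∈ Finset.range d.length, pvDp d ((t : Int) + i) * min (t : Int) ((d.length : Int) - t)

-- the window sum maintained by A's d-variable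
def pvW (d : List Int) (M : ℕ) (i : Int) : Int := ∑ j ∈ Finset.range M, pvDp d ((j : Int) - i)

theorem pvDp_congr (d : List Int) (x y : Int)
    (h : x % (d.length : Int) = y % (d.length : Int)) : pvDp d x = pvDp d y := by
  unfold pvDp; rw [h]

theorem pvDp_emod (d : List Int) (x : Int) : pvDp d (x % (d.length : Int)) = pvDp d x := by
  apply pvDp_congr; exact Int.emod_emod_of_dvd x dvd_rfl

theorem pvDp_natCast (d : List Int) (t : ℕ) (h : t < d.length) :
    pvDp d (t : Int) = d.getD t 0 := by
  unfold pvDp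
  rw [Int.emod_eq_of_lt (by positivity) (by exact_mod_cast h)]
  simp

theorem pv_sum_getD (d : List Int) : (∑ t ∈ Finset.range d.length, d.getD t 0) = d.sum := by
  induction d with
  | nil => simp
  | cons a tl ih =>
    rw [List.length_cons, Finset.sum_range_succ']
    simp only [List.getD_cons_succ, List.getD_cons_zero, List.sum_cons, ih]
    ring

theorem pv_sum_shift (N : ℕ) (hN : 0 < N) (f : Int → Int)
    (hf : ∀ x : Int, f (x % (N : Int)) = f x) (s : Int) :
    (∑ t ∈ Finset.range N, f ((t : Int) + s)) = ∑ t ∈ Finset.range N, f (t : Int) := by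
  have hn : (0 : Int) < (N : Int) := by exact_mod_cast hN
  have hsub : ∀ a b : Int, (a % (N : Int) - b) % (N : Int) = (a - b) % (N : Int) := by
    intro a b
    rw [Int.sub_emod, Int.emod_emod_of_dvd _ dvd_rfl, ← Int.sub_emod]
  refine Finset.sum_nbij' (i := fun t => (((t : Int) + s) % (N : Int)).toNat)
    (j := fun t => (((t : Int) - s) % (N : Int)).toNat) ?_ ?_ ?_ ?_ ?_
  · intro a ha
    have h1 := Int.emod_nonneg ((a : Int) + s) (ne_of_gt hn)
    have h2 := Int.emod_lt_of_pos ((a : Int) + s) hn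
    simp only [Finset.mem_range] at *
    omega
  · intro a ha
    have h1 := Int.emod_nonneg ((a : Int) - s) (ne_of_gt hn)
    have h2 := Int.emod_lt_of_pos ((a : Int) - s) hn
    simp only [Finset.mem_range] at *
    omega
  · intro a ha
    beta_reduce
    simp only [Finset.mem_range] at ha
    have h1 := Int.emod_nonneg ((a : Int) + s) (ne_of_gt hn)
    have heq : (((((a : Int) + s) % (N : Int)).toNat : Int) - s) % (N : Int) = (a : Int) := by
      rw [Int.toNat_of_nonneg h1, hsub, add_sub_cancel_right,
        Int.emod_eq_of_lt (by positivity) (by exact_mod_cast ha)]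
    omega
  · intro a ha
    beta_reduce
    simp only [Finset.mem_range] at ha
    have h1 := Int.emod_nonneg ((a : Int) - s) (ne_of_gt hn)
    have hadd : ∀ x b : Int, (x % (N : Int) + b) % (N : Int) = (x + b) % (N : Int) := by
      intro x b
      rw [Int.add_emod, Int.emod_emod_of_dvd _ dvd_rfl, ← Int.add_emod]
    have heq : (((((a : Int) - s) % (N : Int)).toNat : Int) + s) % (N : Int) = (a : Int) := by
      rw [Int.toNat_of_nonneg h1, hadd, sub_add_cancel,
        Int.emod_eq_of_lt (by positivity) (by exact_mod_cast ha)]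
    omega
  · intro a ha
    have h1 := Int.emod_nonneg ((a : Int) + s) (ne_of_gt hn)
    rw [← hf ((a : Int) + s), Int.toNat_of_nonneg h1]

theorem pv_sum_Dp (d : List Int) (hN : 0 < d.length) (s : Int) :
    (∑ t ∈ Finset.range d.length, pvDp d ((t : Int) + s)) = d.sum := by
  rw [pv_sum_shift d.length hN (pvDp d) (pvDp_emod d) s]
  rw [← pv_sum_getD]
  exact Finset.sum_congr rfl (fun t ht => pvDp_natCast d t (Finset.mem_range.mp ht))

theorem pvW_step (d : List Int) (M : ℕ) (i : Int) :
    pvW d M (i + 1) = pvW d M i - pvDp d ((M : Int) - 1 - i) + pvDp d (-1 - i) := by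
  cases M with
  | zero => simp [pvW]
  | succ K =>
    unfold pvW
    rw [Finset.sum_range_succ' (fun j => pvDp d ((j : Int) - (i + 1))) K,
        Finset.sum_range_succ (fun j => pvDp d ((j : Int) - i)) K]
    have h1 : ∀ j : ℕ, ((j + 1 : ℕ) : Int) - (i + 1) = (j : Int) - i := by intro j; push_cast; ring
    have h2 : ((0 : ℕ) : Int) - (i + 1) = -1 - i := by push_cast; ring
    have h3 : ((K + 1 : ℕ) : Int) - 1 - i = (K : Int) - i := by push_cast; ring
    simp only [h1, h2, h3]
    ring

theorem pv_sum_if_lt (N M : ℕ) (h : M ≤ N) (g : ℕ → Int) :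
    (∑ t ∈ Finset.range N, if t < M then g t else 0) = ∑ t ∈ Finset.range M, g t := by
  rw [← Finset.sum_subset
    (by intro x hx; simp only [Finset.mem_range] at *; omega : Finset.range M ⊆ Finset.range N)
    (fun x _ hnx => if_neg (by simp only [Finset.mem_range] at hnx; omega))]
  exact Finset.sum_congr rfl (fun t ht => if_pos (Finset.mem_range.mp ht))

theorem pvShifted (d : List Int) (hN : 0 < d.length) (i : Int) :
    pvC d (-(i + 1)) = ∑ t ∈ Finset.range d.length,
      pvDp d ((t : Int) - i) *
        min (((t : Int) + 1) % (d.length : Int))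
            ((d.length : Int) - ((t : Int) + 1) % (d.length : Int)) := by
  have hn : (0 : Int) < (d.length : Int) := by exact_mod_cast hN
  have hsub : ∀ a b : Int, (a % (d.length : Int) - b) % (d.length : Int)
      = (a - b) % (d.length : Int) := by
    intro a b
    rw [Int.sub_emod, Int.emod_emod_of_dvd _ dvd_rfl, ← Int.sub_emod]
  have h1 : pvC d (-(i + 1)) = ∑ t ∈ Finset.range d.length,
      (fun x : Int => pvDp d (x - (i + 1)) *
        min (x % (d.length : Int)) ((d.length : Int) - x % (d.length : Int))) (t : Int) := by
    unfold pvC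
    refine Finset.sum_congr rfl (fun t ht => ?_)
    have htlt : (t : Int) < (d.length : Int) := by exact_mod_cast Finset.mem_range.mp ht
    beta_reduce
    rw [Int.emod_eq_of_lt (by positivity) htlt,
        show (t : Int) + -(i + 1) = (t : Int) - (i + 1) from by ring]
  have hF : ∀ x : Int,
      (fun x : Int => pvDp d (x - (i + 1)) *
        min (x % (d.length : Int)) ((d.length : Int) - x % (d.length : Int)))
          (x % (d.length : Int))
      = (fun x : Int => pvDp d (x - (i + 1)) *
        min (x % (d.length : Int)) ((d.length : Int) - x % (d.length : Int))) x := by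
    intro x
    beta_reduce
    rw [Int.emod_emod_of_dvd _ dvd_rfl, pvDp_congr d _ _ (hsub x (i + 1))]
  refine h1.trans ((pv_sum_shift d.length hN
    (fun x : Int => pvDp d (x - (i + 1)) *
      min (x % (d.length : Int)) ((d.length : Int) - x % (d.length : Int))) hF 1).symm.trans ?_)
  refine Finset.sum_congr rfl (fun t _ => ?_)
  beta_reduce
  rw [show ((t : Int) + 1) - (i + 1) = (t : Int) - i from by ring]

theorem pvDeltaE (d : List Int) (M : ℕ) (hM : d.length = 2 * M) (hN : 0 < d.length)
    (i : Int) :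
    pvC d (-(i + 1)) = pvC d (-i) + 2 * pvW d M i - d.sum := by
  have hn : (0 : Int) < (d.length : Int) := by exact_mod_cast hN
  have h3 : pvC d (-(i + 1)) = ∑ t ∈ Finset.range d.length,
      (pvDp d ((t : Int) - i) * min (t : Int) ((d.length : Int) - t)
        + ((if t < M then 2 * pvDp d ((t : Int) - i) else 0) - pvDp d ((t : Int) - i))) := by
    rw [pvShifted d hN i]
    refine Finset.sum_congr rfl (fun t ht => ?_)
    have ht' := Finset.mem_range.mp ht
    rcases Nat.lt_or_ge (t + 1) d.length with hlt | hge
    · have hcast : ((t : Int) + 1) < (d.length : Int) := by exact_mod_cast hlt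
      rw [Int.emod_eq_of_lt (by positivity) hcast]
      rcases Nat.lt_or_ge t M with htM | htM
      · rw [if_pos htM]
        have hmin : min ((t : Int) + 1) ((d.length : Int) - ((t : Int) + 1))
            = min (t : Int) ((d.length : Int) - t) + 1 := by
          have hMc : (d.length : Int) = 2 * (M : Int) := by exact_mod_cast hM
          have htMc : (t : Int) < (M : Int) := by exact_mod_cast htM
          omega
        rw [hmin]; ring
      · rw [if_neg (by omega)]
        have hmin : min ((t : Int) + 1) ((d.length : Int) - ((t : Int) + 1))
            = min (t : Int) ((d.length : Int) - t) - 1 := by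
          have hMc : (d.length : Int) = 2 * (M : Int) := by exact_mod_cast hM
          have htMc : (M : Int) ≤ (t : Int) := by exact_mod_cast htM
          have htc : (t : Int) + 1 < (d.length : Int) := by exact_mod_cast hlt
          omega
        rw [hmin]; ring
    · have heq : (t : Int) + 1 = (d.length : Int) := by omega
      rw [heq, Int.emod_self]
      rw [if_neg (by omega)]
      have hmin : min (t : Int) ((d.length : Int) - t) = 1 := by
        have hMc : (d.length : Int) = 2 * (M : Int) := by exact_mod_cast hM
        have h1 : (t : Int) + 1 = (d.length : Int) := heq
        have hM1 : 1 ≤ (M : Int) := by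
          have : 1 ≤ M := by omega
          exact_mod_cast this
        omega
      rw [hmin]
      have : min (0 : Int) ((d.length : Int) - 0) = 0 := by omega
      rw [this]; ring
  rw [h3, Finset.sum_add_distrib, Finset.sum_sub_distrib]
  have hA : (∑ t ∈ Finset.range d.length, pvDp d ((t : Int) - i) * min (t : Int) ((d.length : Int) - t))
      = pvC d (-i) := by
    unfold pvC
    refine Finset.sum_congr rfl (fun t _ => ?_)
    rw [show (t : Int) + -i = (t : Int) - i from by ring]
  have hB : (∑ t ∈ Finset.range d.length, if t < M then 2 * pvDp d ((t : Int) - i) else 0)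
      = 2 * pvW d M i := by
    rw [pv_sum_if_lt d.length M (by omega) (fun t => 2 * pvDp d ((t : Int) - i))]
    unfold pvW
    rw [Finset.mul_sum]
  have hT : (∑ t ∈ Finset.range d.length, pvDp d ((t : Int) - i)) = d.sum := by
    rw [← pv_sum_Dp d hN (-i)]
    exact Finset.sum_congr rfl (fun t _ => by
      rw [show (t : Int) + -i = (t : Int) - i from by ring])
  rw [hA, hB, hT]
  ring

theorem pvDeltaO (d : List Int) (M : ℕ) (hM : d.length = 2 * M + 1) (hN : 0 < d.length)
    (i : Int) :
    pvC d (-(i + 1)) = pvC d (-i) + (2 * pvW d M i + pvDp d ((M : Int) - i)) - d.sum := by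
  have hn : (0 : Int) < (d.length : Int) := by exact_mod_cast hN
  have hMc : (d.length : Int) = 2 * (M : Int) + 1 := by exact_mod_cast hM
  have h3 : pvC d (-(i + 1)) = ∑ t ∈ Finset.range d.length,
      (pvDp d ((t : Int) - i) * min (t : Int) ((d.length : Int) - t)
        + ((if t < M + 1 then (if t < M then 2 * pvDp d ((t : Int) - i) else pvDp d ((t : Int) - i)) else 0)
            - pvDp d ((t : Int) - i))) := by
    rw [pvShifted d hN i]
    refine Finset.sum_congr rfl (fun t ht => ?_)
    have ht' := Finset.mem_range.mp ht
    rcases Nat.lt_or_ge (t + 1) d.length with hlt | hge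
    · have hcast : ((t : Int) + 1) < (d.length : Int) := by exact_mod_cast hlt
      rw [Int.emod_eq_of_lt (by positivity) hcast]
      rcases Nat.lt_or_ge t M with htM | htM
      · rw [if_pos (by omega), if_pos htM]
        have htMc : (t : Int) < (M : Int) := by exact_mod_cast htM
        have hmin : min ((t : Int) + 1) ((d.length : Int) - ((t : Int) + 1))
            = min (t : Int) ((d.length : Int) - t) + 1 := by omega
        rw [hmin]; ring
      · rcases Nat.eq_or_lt_of_le htM with htM' | htM'
        · rw [if_pos (by omega), if_neg (by omega)]
          have htMc : (t : Int) = (M : Int) := by exact_mod_cast htM'.symm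
          have hmin : min ((t : Int) + 1) ((d.length : Int) - ((t : Int) + 1))
              = min (t : Int) ((d.length : Int) - t) := by omega
          rw [hmin]; ring
        · rw [if_neg (by omega)]
          have htMc : (M : Int) < (t : Int) := by exact_mod_cast htM'
          have htc : (t : Int) + 1 < (d.length : Int) := by exact_mod_cast hlt
          have hmin : min ((t : Int) + 1) ((d.length : Int) - ((t : Int) + 1))
              = min (t : Int) ((d.length : Int) - t) - 1 := by omega
          rw [hmin]; ring
    · have heq : (t : Int) + 1 = (d.length : Int) := by omega
      rw [heq, Int.emod_self]
      have htc : (t : Int) + 1 = (d.length : Int) := heq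
      rcases Nat.eq_zero_or_pos M with hM0 | hM1
      · have hMc0 : (M : Int) = 0 := by exact_mod_cast hM0
        rw [if_pos (by omega), if_neg (by omega)]
        have hmin0 : min (t : Int) ((d.length : Int) - t) = 0 := by omega
        have hmin0' : min (0 : Int) ((d.length : Int) - 0) = 0 := by omega
        rw [hmin0, hmin0']; ring
      · have hM1c : 1 ≤ (M : Int) := by exact_mod_cast hM1
        rw [if_neg (by omega)]
        have hmin : min (t : Int) ((d.length : Int) - t) = 1 := by omega
        have hmin0 : min (0 : Int) ((d.length : Int) - 0) = 0 := by omega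
        rw [hmin, hmin0]; ring
  rw [h3, Finset.sum_add_distrib, Finset.sum_sub_distrib]
  have hA : (∑ t ∈ Finset.range d.length, pvDp d ((t : Int) - i) * min (t : Int) ((d.length : Int) - t))
      = pvC d (-i) := by
    unfold pvC
    refine Finset.sum_congr rfl (fun t _ => ?_)
    rw [show (t : Int) + -i = (t : Int) - i from by ring]
  have hB : (∑ t ∈ Finset.range d.length,
      if t < M + 1 then (if t < M then 2 * pvDp d ((t : Int) - i) else pvDp d ((t : Int) - i)) else 0)
      = 2 * pvW d M i + pvDp d ((M : Int) - i) := by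
    rw [pv_sum_if_lt d.length (M + 1) (by omega)
      (fun t => if t < M then 2 * pvDp d ((t : Int) - i) else pvDp d ((t : Int) - i))]
    rw [Finset.sum_range_succ]
    rw [if_neg (by omega)]
    congr 1
    rw [show (2 : Int) * pvW d M i = ∑ j ∈ Finset.range M, 2 * pvDp d ((j : Int) - i) from by
      unfold pvW; rw [Finset.mul_sum]]
    exact Finset.sum_congr rfl (fun t ht => if_pos (Finset.mem_range.mp ht))
  have hT : (∑ t ∈ Finset.range d.length, pvDp d ((t : Int) - i)) = d.sum := by
    rw [← pv_sum_Dp d hN (-i)]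
    exact Finset.sum_congr rfl (fun t _ => by
      rw [show (t : Int) + -i = (t : Int) - i from by ring])
  rw [hA, hB, hT]
  ring

theorem pv_agetD (a : Array Int) (k : ℕ) : a.getD k 0 = a.toList.getD k 0 := by
  rw [Array.getD, List.getD_eq_getElem?_getD]
  split
  · rename_i h
    rw [List.getElem?_eq_getElem (by simpa using h), Array.getElem_toList]
    rfl
  · rename_i h
    rw [List.getElem?_eq_none (by simpa using Nat.le_of_not_lt h)]
    rfl

theorem pvAget_mod (a : Array Int) (d : List Int) (had : a.toList = d) (hN : 0 < d.length)
    (x : Int) : a.getD (PySem.Int.mod x (d.length : Int)).toNat 0 = pvDp d x := by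
  have hn : (0 : Int) < (d.length : Int) := by exact_mod_cast hN
  rw [pv_agetD, had, PySem.Int.mod_eq_emod_of_pos hn]
  rfl

theorem pvAget_nat (a : Array Int) (d : List Int) (had : a.toList = d) (t : ℕ) :
    a.getD ((t : Int)).toNat 0 = d.getD t 0 := by
  rw [pv_agetD, had, Int.toNat_natCast]

theorem pvLoopE (a : Array Int) (d : List Int) (had : a.toList = d) (M : ℕ)
    (hM : d.length = 2 * M) (hN : 0 < d.length) :
    ∀ (j : ℕ) (i res : Int), 0 ≤ i →
      (PySem.List.pyRange i (i + (j : Int)) 1).foldl (pvStepE a (d.length : Int) (M : Int))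
          (pvC d (-i) + i * (d.sum - (d.length : Int)), res, pvW d M i)
        = (pvC d (-(i + (j : Int))) + (i + (j : Int)) * (d.sum - (d.length : Int)),
           ((List.range j).map (fun (t : ℕ) => pvC d (-(i + 1 + (t : Int)))
              + (i + 1 + (t : Int)) * (d.sum - (d.length : Int)))).foldl min res,
           pvW d M (i + (j : Int))) := by
  intro j
  induction j with
  | zero =>
    intro i res _
    simp [PySem.List.pyRange_one_eq_nil]
  | succ j ih =>
    intro i res hi
    have hcast : ((j + 1 : ℕ) : Int) = (j : Int) + 1 := by push_cast; ring
    rw [hcast, PySem.List.pyRange_one_cons (by omega : i < i + ((j : Int) + 1)),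
        List.foldl_cons]
    have hr : pvC d (-i) + i * (d.sum - (d.length : Int)) + 2 * pvW d M i - (d.length : Int)
        = pvC d (-(i + 1)) + (i + 1) * (d.sum - (d.length : Int)) := by
      rw [pvDeltaE d M hM hN i]
      ring
    have hstep : pvStepE a (d.length : Int) (M : Int)
        (pvC d (-i) + i * (d.sum - (d.length : Int)), res, pvW d M i) i
        = (pvC d (-(i + 1)) + (i + 1) * (d.sum - (d.length : Int)),
           min res (pvC d (-(i + 1)) + (i + 1) * (d.sum - (d.length : Int))),
           pvW d M (i + 1)) := by
      simp only [pvStepE]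
      rw [pvAget_mod a d had hN ((M : Int) - i - 1), pvAget_mod a d had hN (-i - 1),
          show (-i - 1 : Int) = -1 - i from by ring,
          show ((M : Int) - i - 1) = (M : Int) - 1 - i from by ring,
          ← pvW_step d M i, hr]
    rw [hstep,
        show i + ((j : Int) + 1) = (i + 1) + (j : Int) from by ring,
        ih (i + 1) (min res (pvC d (-(i + 1)) + (i + 1) * (d.sum - (d.length : Int)))) (by omega)]
    refine congrArg₂ Prod.mk rfl (congrArg₂ Prod.mk ?_ rfl)
    rw [List.range_succ_eq_map, List.map_cons, List.foldl_cons, List.map_map]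
    congr 1
    · rw [show i + 1 + ((0 : ℕ) : Int) = i + 1 from by push_cast; ring]
    · refine List.map_congr_left (fun t _ => ?_)
      simp only [Function.comp]
      rw [show i + 1 + 1 + (t : Int) = i + 1 + ((t.succ : ℕ) : Int) from by push_cast; ring]

theorem pvLoopO (a : Array Int) (d : List Int) (had : a.toList = d) (M : ℕ)
    (hM : d.length = 2 * M + 1) (hN : 0 < d.length) :
    ∀ (j : ℕ) (i res : Int), 0 ≤ i →
      (PySem.List.pyRange i (i + (j : Int)) 1).foldl (pvStepO a (d.length : Int) (M : Int))
          (pvC d (-i) + i * (d.sum - (d.length : Int)), res,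
           2 * pvW d M i + pvDp d ((M : Int) - i))
        = (pvC d (-(i + (j : Int))) + (i + (j : Int)) * (d.sum - (d.length : Int)),
           ((List.range j).map (fun (t : ℕ) => pvC d (-(i + 1 + (t : Int)))
              + (i + 1 + (t : Int)) * (d.sum - (d.length : Int)))).foldl min res,
           2 * pvW d M (i + (j : Int)) + pvDp d ((M : Int) - (i + (j : Int)))) := by
  intro j
  induction j with
  | zero =>
    intro i res _
    simp [PySem.List.pyRange_one_eq_nil]
  | succ j ih =>
    intro i res hi
    have hcast : ((j + 1 : ℕ) : Int) = (j : Int) + 1 := by push_cast; ring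
    rw [hcast, PySem.List.pyRange_one_cons (by omega : i < i + ((j : Int) + 1)),
        List.foldl_cons]
    have hr : pvC d (-i) + i * (d.sum - (d.length : Int))
          + (2 * pvW d M i + pvDp d ((M : Int) - i)) - (d.length : Int)
        = pvC d (-(i + 1)) + (i + 1) * (d.sum - (d.length : Int)) := by
      rw [pvDeltaO d M hM hN i]
      ring
    have hstep : pvStepO a (d.length : Int) (M : Int)
        (pvC d (-i) + i * (d.sum - (d.length : Int)), res,
         2 * pvW d M i + pvDp d ((M : Int) - i)) i
        = (pvC d (-(i + 1)) + (i + 1) * (d.sum - (d.length : Int)),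
           min res (pvC d (-(i + 1)) + (i + 1) * (d.sum - (d.length : Int))),
           2 * pvW d M (i + 1) + pvDp d ((M : Int) - (i + 1))) := by
      simp only [pvStepO]
      rw [pvAget_mod a d had hN ((M : Int) - i - 1), pvAget_mod a d had hN ((M : Int) - i),
          pvAget_mod a d had hN (-i - 1), hr]
      refine congrArg₂ Prod.mk rfl (congrArg₂ Prod.mk rfl ?_)
      rw [pvW_step d M i,
          show ((M : Int) - 1 - i) = (M : Int) - i - 1 from by ring,
          show (-1 - i : Int) = -i - 1 from by ring,
          show ((M : Int) - (i + 1)) = (M : Int) - i - 1 from by ring]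
      ring
    rw [hstep,
        show i + ((j : Int) + 1) = (i + 1) + (j : Int) from by ring,
        ih (i + 1) (min res (pvC d (-(i + 1)) + (i + 1) * (d.sum - (d.length : Int)))) (by omega)]
    refine congrArg₂ Prod.mk rfl (congrArg₂ Prod.mk ?_ rfl)
    rw [List.range_succ_eq_map, List.map_cons, List.foldl_cons, List.map_map]
    congr 1
    · rw [show i + 1 + ((0 : ℕ) : Int) = i + 1 from by push_cast; ring]
    · refine List.map_congr_left (fun t _ => ?_)
      simp only [Function.comp]
      rw [show i + 1 + 1 + (t : Int) = i + 1 + ((t.succ : ℕ) : Int) from by push_cast; ring]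

theorem pv_fold_sum (N : ℕ) (g : Int → Int) (init : Int) :
    (PySem.List.pyRange 0 (N : Int) 1).foldl (fun acc k => acc + g k) init
      = init + ∑ t ∈ Finset.range N, g (t : Int) := by
  rw [PySem.List.foldl_add, PySem.List.pyRange_one]
  congr 1
  rw [show ((N : Int) - 0).toNat = N from by omega, List.map_map]
  rw [show (g ∘ fun k : ℕ => 0 + (k : Int)) = (fun k : ℕ => g (k : Int)) from
    funext fun k => by simp]
  rfl

theorem pv_fold_sum' (a : Int) (q : ℕ) (g : Int → Int) (init : Int) :
    (PySem.List.pyRange a (a + (q : Int)) 1).foldl (fun acc k => acc + g k) init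
      = init + ∑ t ∈ Finset.range q, g (a + (t : Int)) := by
  rw [PySem.List.foldl_add, PySem.List.pyRange_one]
  congr 1
  rw [show (a + (q : Int) - a).toNat = q from by omega, List.map_map]
  rfl

theorem pvBase_sum (d : List Int) :
    (∑ k ∈ Finset.range d.length, d.getD k 0 * min (k : Int) ((d.length : Int) - (k : Int)))
      = pvC d 0 := by
  unfold pvC
  refine Finset.sum_congr rfl (fun t ht => ?_)
  have ht' := Finset.mem_range.mp ht
  rw [show (t : Int) + 0 = (t : Int) from by ring, pvDp_natCast d t ht']

theorem pvTake_sum (d : List Int) (M : ℕ) (hM : M ≤ d.length) :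
    (d.take M).sum = pvW d M 0 := by
  rw [← pv_sum_getD (d.take M)]
  have hlen : (d.take M).length = M := by simp [hM]
  rw [hlen]
  unfold pvW
  refine Finset.sum_congr rfl (fun t ht => ?_)
  have ht' := Finset.mem_range.mp ht
  rw [show (t : Int) - 0 = (t : Int) from by ring, pvDp_natCast d t (by omega)]
  rw [List.getD_eq_getElem?_getD, List.getD_eq_getElem?_getD, List.getElem?_take]
  rw [if_pos ht']

theorem pvR0E (a : Array Int) (d : List Int) (had : a.toList = d) (M : ℕ)
    (hM : d.length = 2 * M) :
    (PySem.List.pyRange (M : Int) (d.length : Int) 1).foldl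
      (fun r i => r + ((d.length : Int) - i) * a.getD i.toNat 0)
      ((PySem.List.pyRange 0 (M : Int) 1).foldl
        (fun r i => r + i * a.getD i.toNat 0) 0)
      = pvC d 0 := by
  rw [pv_fold_sum M (fun i => i * a.getD i.toNat 0) 0, zero_add]
  rw [show (d.length : Int) = (M : Int) + ((M : ℕ) : Int) from by omega]
  rw [pv_fold_sum' (M : Int) M
    (fun i => ((M : Int) + ((M : ℕ) : Int) - i) * a.getD i.toNat 0)]
  unfold pvC
  rw [show d.length = M + M from by omega]
  rw [Finset.sum_range_add _ M M]
  congr 1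
  · refine Finset.sum_congr rfl (fun t ht => ?_)
    have ht' := Finset.mem_range.mp ht
    have e1 : pvDp d ((t : Int) + 0) = d.getD t 0 := by
      rw [show (t : Int) + 0 = (t : Int) from by ring]
      exact pvDp_natCast d t (by rw [show d.length = M + M from by omega]; omega)
    have e3 : min (t : Int) (((M + M : ℕ) : Int) - (t : Int)) = (t : Int) := by
      push_cast; omega
    rw [e1, e3, pvAget_nat a d had]
    ring
  · refine Finset.sum_congr rfl (fun t ht => ?_)
    have ht' := Finset.mem_range.mp ht
    have e1 : pvDp d (((M + t : ℕ) : Int) + 0) = d.getD (M + t) 0 := by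
      rw [show ((M + t : ℕ) : Int) + 0 = ((M + t : ℕ) : Int) from by ring]
      exact pvDp_natCast d (M + t) (by omega)
    have e2 : a.getD ((M : Int) + (t : Int)).toNat 0 = d.getD (M + t) 0 := by
      rw [show (M : Int) + (t : Int) = ((M + t : ℕ) : Int) from by push_cast; ring,
          pvAget_nat a d had]
    have e3 : min ((M + t : ℕ) : Int) (((M + M : ℕ) : Int) - ((M + t : ℕ) : Int))
        = ((M + M : ℕ) : Int) - ((M + t : ℕ) : Int) := by push_cast; omega
    rw [e1, e2, e3]
    push_cast; ring

theorem pvR0O (a : Array Int) (d : List Int) (had : a.toList = d) (M : ℕ)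
    (hM : d.length = 2 * M + 1) :
    (PySem.List.pyRange ((M : Int) + 1) (d.length : Int) 1).foldl
      (fun r i => r + ((d.length : Int) - i) * a.getD i.toNat 0)
      ((PySem.List.pyRange 0 ((M : Int) + 1) 1).foldl
        (fun r i => r + i * a.getD i.toNat 0) 0)
      = pvC d 0 := by
  rw [show ((M : Int) + 1) = ((M + 1 : ℕ) : Int) from by push_cast; ring]
  rw [pv_fold_sum (M + 1) (fun i => i * a.getD i.toNat 0) 0, zero_add]
  rw [show (d.length : Int) = ((M + 1 : ℕ) : Int) + ((M : ℕ) : Int) from by push_cast; omega]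
  rw [pv_fold_sum' ((M + 1 : ℕ) : Int) M
    (fun i => (((M + 1 : ℕ) : Int) + ((M : ℕ) : Int) - i) * a.getD i.toNat 0)]
  unfold pvC
  rw [show d.length = (M + 1) + M from by omega]
  rw [Finset.sum_range_add _ (M + 1) M]
  congr 1
  · refine Finset.sum_congr rfl (fun t ht => ?_)
    have ht' := Finset.mem_range.mp ht
    have e1 : pvDp d ((t : Int) + 0) = d.getD t 0 := by
      rw [show (t : Int) + 0 = (t : Int) from by ring]
      exact pvDp_natCast d t (by rw [show d.length = (M + 1) + M from by omega]; omega)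
    have e3 : min (t : Int) ((((M + 1) + M : ℕ) : Int) - (t : Int)) = (t : Int) := by
      push_cast; omega
    rw [e1, e3, pvAget_nat a d had]
    ring
  · refine Finset.sum_congr rfl (fun t ht => ?_)
    have ht' := Finset.mem_range.mp ht
    have e1 : pvDp d ((((M + 1) + t : ℕ) : Int) + 0) = d.getD ((M + 1) + t) 0 := by
      rw [show (((M + 1) + t : ℕ) : Int) + 0 = (((M + 1) + t : ℕ) : Int) from by ring]
      exact pvDp_natCast d ((M + 1) + t) (by omega)
    have e2 : a.getD (((M + 1 : ℕ) : Int) + (t : Int)).toNat 0 = d.getD ((M + 1) + t) 0 := by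
      rw [show ((M + 1 : ℕ) : Int) + (t : Int) = (((M + 1) + t : ℕ) : Int) from by push_cast; ring,
          pvAget_nat a d had]
    have e3 : min ((((M + 1) + t : ℕ) : Int)) ((((M + 1) + M : ℕ) : Int) - (((M + 1) + t : ℕ) : Int))
        = (((M + 1) + M : ℕ) : Int) - (((M + 1) + t : ℕ) : Int) := by push_cast; omega
    rw [e1, e2, e3]
    push_cast; ring


theorem pvBuild_len (n : Int) (p_list : List Int) :
    (pvBuild n p_list).toList.length = n.toNat := by
  unfold pvBuild
  have h : ∀ (l : List (Int × Int)) (acc : Array Int),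
      (l.foldl (pvBump n) acc).size = acc.size := by
    intro l
    induction l with
    | nil => intro acc; rfl
    | cons x tl ih =>
      intro acc
      rw [List.foldl_cons, ih]
      unfold pvBump
      rw [Array.size_setIfInBounds]
  rw [Array.length_toList, h, Array.size_replicate]

theorem pv_sum_range (f : ℕ → Int) (n : ℕ) :
    ((List.range n).map f).sum = ∑ i ∈ Finset.range n, f i := by
  induction n with
  | zero => simp
  | succ k ih => rw [List.range_succ, List.map_append, List.sum_append,
      Finset.sum_range_succ, ih, List.map_singleton, List.sum_singleton]

-- B's base is the cost of the zero rotation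
theorem pvEnumBase (a : Array Int) (d : List Int) (had : a.toList = d) :
    ((PySem.List.pyRange 0 (d.length : Int) 1).map
      (fun k => a.getD k.toNat 0 * min k ((d.length : Int) - k))).sum = pvC d 0 := by
  rw [PySem.List.pyRange_one, List.map_map, pv_sum_range,
      show ((d.length : Int) - 0).toNat = d.length from by omega, ← pvBase_sum d]
  refine Finset.sum_congr rfl (fun k hk => ?_)
  have hk' := Finset.mem_range.mp hk
  simp only [Function.comp, zero_add]
  rw [pvAget_nat a d had]

-- the prefix-sum array read at k is the sum of the first k histogram entries
theorem pvPref_size (d : List Int) :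
    (d.foldl (fun acc c => acc.push (acc.getD (acc.size - 1) 0 + c)) #[0]).size
      = d.length + 1 := by
  induction d using List.reverseRecOn with
  | nil => rfl
  | append_singleton d' c ih =>
    rw [List.foldl_append, List.foldl_cons, List.foldl_nil, Array.size_push, ih,
        List.length_append, List.length_singleton]

theorem pvPref_spec (a : Array Int) (d : List Int) (had : a.toList = d) :
    ∀ k : ℕ, k ≤ d.length →
      (pvPref a).getD k 0 = ∑ x ∈ Finset.range k, d.getD x 0 := by
  have hfold : pvPref a
      = d.foldl (fun acc c => acc.push (acc.getD (acc.size - 1) 0 + c)) #[0] := by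
    rw [pvPref, ← had, ← Array.foldl_toList]
  rw [hfold]
  clear hfold had a
  induction d using List.reverseRecOn with
  | nil =>
    intro k hk
    have hk0 : k = 0 := by simpa using hk
    subst hk0
    rfl
  | append_singleton d' c ih =>
    intro k hk
    rw [List.foldl_append, List.foldl_cons, List.foldl_nil]
    have hsz := pvPref_size d'
    set A' := List.foldl (fun acc c => acc.push (acc.getD (acc.size - 1) 0 + c)) #[0] d'
      with hA'
    have hlist : (A'.push (A'.getD (A'.size - 1) 0 + c)).toList
        = A'.toList ++ [A'.getD (A'.size - 1) 0 + c] := Array.toList_push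
    rw [pv_agetD, hlist]
    have hlen : A'.toList.length = d'.length + 1 := by
      rw [Array.length_toList, hsz]
    rw [List.length_append, List.length_singleton] at hk
    rcases Nat.lt_or_ge k (d'.length + 1) with hlt | hge
    · rw [List.getD_append _ _ _ _ (by omega), ← pv_agetD, ih k (by omega)]
      refine Finset.sum_congr rfl (fun x hx => ?_)
      have hx' := Finset.mem_range.mp hx
      rw [List.getD_append _ _ _ _ (by omega)]
    · have hkeq : k = d'.length + 1 := by omega
      subst hkeq
      have hrhs : (∑ x ∈ Finset.range (d'.length + 1), (d' ++ [c]).getD x 0)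
          = (∑ x ∈ Finset.range d'.length, d'.getD x 0) + c := by
        rw [Finset.sum_range_succ, List.getD_append_right _ _ _ _ (le_refl _), Nat.sub_self,
            List.getD_cons_zero]
        congr 1
        exact Finset.sum_congr rfl (fun x hx =>
          List.getD_append _ _ _ _ (Finset.mem_range.mp hx))
      rw [hrhs, List.getD_append_right _ _ _ _ (by omega), hlen, Nat.sub_self,
          List.getD_cons_zero, hsz, Nat.add_sub_cancel, ih d'.length (by omega)]

-- the windowed prefix-sum read is the circular window sum of the histogram
theorem pvWsum_spec (pref a : Array Int) (d : List Int) (had : a.toList = d)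
    (hpref : pref = pvPref a) (s h : Int)
    (hs0 : 0 ≤ s) (hsN : s < (d.length : Int)) (hh0 : 0 ≤ h) (hhN : h ≤ (d.length : Int)) :
    pvWsum pref (d.length : Int) s h
      = ∑ x ∈ Finset.range h.toNat, pvDp d (s + (x : Int)) := by
  have hget := pvPref_spec a d had
  subst hpref
  unfold pvWsum
  by_cases hcase : s + h ≤ (d.length : Int)
  · rw [if_pos hcase, hget (s + h).toNat (by omega), hget s.toNat (by omega)]
    rw [show (s + h).toNat = s.toNat + h.toNat from by omega, Finset.sum_range_add]
    rw [add_sub_cancel_left]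
    refine Finset.sum_congr rfl (fun x hx => ?_)
    have hx' := Finset.mem_range.mp hx
    rw [show s + (x : Int) = ((s.toNat + x : ℕ) : Int) from by push_cast; omega,
        pvDp_natCast d (s.toNat + x) (by omega)]
  · rw [if_neg hcase, Int.toNat_natCast, hget d.length (by omega), hget s.toNat (by omega),
        hget (s + h - (d.length : Int)).toNat (by omega)]
    have hsplit : h.toNat = (d.length - s.toNat) + (s + h - (d.length : Int)).toNat := by
      omega
    rw [hsplit, Finset.sum_range_add]
    have h1 : (∑ x ∈ Finset.range (d.length - s.toNat), pvDp d (s + (x : Int)))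
        = ∑ x ∈ Finset.range d.length, d.getD x 0
          - ∑ x ∈ Finset.range s.toNat, d.getD x 0 := by
      conv_rhs => rw [show d.length = s.toNat + (d.length - s.toNat) from by omega]
      rw [Finset.sum_range_add, add_sub_cancel_left]
      refine Finset.sum_congr rfl (fun x hx => ?_)
      have hx' := Finset.mem_range.mp hx
      rw [show s + (x : Int) = ((s.toNat + x : ℕ) : Int) from by push_cast; omega,
          pvDp_natCast d (s.toNat + x) (by omega)]
    have h2 : (∑ x ∈ Finset.range (s + h - (d.length : Int)).toNat,
          pvDp d (s + (((d.length - s.toNat) + x : ℕ) : Int)))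
        = ∑ x ∈ Finset.range (s + h - (d.length : Int)).toNat, d.getD x 0 := by
      refine Finset.sum_congr rfl (fun x hx => ?_)
      have hx' := Finset.mem_range.mp hx
      have hcong : pvDp d (s + (((d.length - s.toNat) + x : ℕ) : Int)) = pvDp d (x : Int) := by
        apply pvDp_congr
        rw [show s + (((d.length - s.toNat) + x : ℕ) : Int)
              = (x : Int) + (d.length : Int) * 1 from by push_cast; omega]
        rw [Int.add_mul_emod_self_left]
      rw [hcong, pvDp_natCast d x (by omega)]
    rw [h1, h2]

-- one step of B's loop, expressed in terms of the rotation costs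
theorem pvStepB_eq (pref : Array Int) (d : List Int)
    (hadj : ∀ i : Int,
      pvWsum pref (d.length : Int) (PySem.Int.mod (1 - (i + 1)) (d.length : Int))
          (PySem.Int.floordiv ((d.length : Int) + 1) 2)
        + pvWsum pref (d.length : Int) (PySem.Int.mod (1 - (i + 1)) (d.length : Int))
          (PySem.Int.floordiv (d.length : Int) 2)
        = pvC d (-(i + 1)) - pvC d (-i) + d.sum)
    (i res : Int) :
    pvStepB pref (d.length : Int)
      (res, pvC d (-i) + i * (d.sum - (d.length : Int))) (i + 1)
      = (min res (pvC d (-(i + 1)) + (i + 1) * (d.sum - (d.length : Int))),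
         pvC d (-(i + 1)) + (i + 1) * (d.sum - (d.length : Int))) := by
  simp only [pvStepB]
  have hr : pvC d (-i) + i * (d.sum - (d.length : Int))
        + pvWsum pref (d.length : Int) (PySem.Int.mod (1 - (i + 1)) (d.length : Int))
            (PySem.Int.floordiv ((d.length : Int) + 1) 2)
        + pvWsum pref (d.length : Int) (PySem.Int.mod (1 - (i + 1)) (d.length : Int))
            (PySem.Int.floordiv (d.length : Int) 2)
        - (d.length : Int)
      = pvC d (-(i + 1)) + (i + 1) * (d.sum - (d.length : Int)) := by
    linear_combination hadj i
  rw [hr]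

-- B's loop walks the same rotation costs and minimum as A's
theorem pvLoopB (pref : Array Int) (d : List Int)
    (hadj : ∀ i : Int,
      pvWsum pref (d.length : Int) (PySem.Int.mod (1 - (i + 1)) (d.length : Int))
          (PySem.Int.floordiv ((d.length : Int) + 1) 2)
        + pvWsum pref (d.length : Int) (PySem.Int.mod (1 - (i + 1)) (d.length : Int))
          (PySem.Int.floordiv (d.length : Int) 2)
        = pvC d (-(i + 1)) - pvC d (-i) + d.sum) :
    ∀ (j : ℕ) (i res : Int), 0 ≤ i →
      (PySem.List.pyRange (i + 1) (i + 1 + (j : Int)) 1).foldl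
          (pvStepB pref (d.length : Int))
          (res, pvC d (-i) + i * (d.sum - (d.length : Int)))
        = (((List.range j).map (fun (t : ℕ) => pvC d (-(i + 1 + (t : Int)))
              + (i + 1 + (t : Int)) * (d.sum - (d.length : Int)))).foldl min res,
           pvC d (-(i + (j : Int))) + (i + (j : Int)) * (d.sum - (d.length : Int))) := by
  intro j
  induction j with
  | zero =>
    intro i res _
    simp [PySem.List.pyRange_one_eq_nil]
  | succ j ih =>
    intro i res hi
    have hcast : ((j + 1 : ℕ) : Int) = (j : Int) + 1 := by push_cast; ring
    rw [hcast, PySem.List.pyRange_one_cons (by omega : i + 1 < i + 1 + ((j : Int) + 1)),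
        List.foldl_cons, pvStepB_eq pref d hadj i res]
    have hre : i + 1 + ((j : Int) + 1) = (i + 1) + 1 + (j : Int) := by ring
    rw [hre, ih (i + 1) (min res (pvC d (-(i + 1)) + (i + 1) * (d.sum - (d.length : Int)))) (by omega)]
    refine congrArg₂ Prod.mk ?_ (by rw [show i + ((j : Int) + 1) = i + 1 + (j : Int) from by ring])
    rw [List.range_succ_eq_map, List.map_cons, List.foldl_cons, List.map_map]
    congr 1
    · rw [show i + 1 + ((0 : ℕ) : Int) = i + 1 from by push_cast; ring]
    · refine List.map_congr_left (fun t _ => ?_)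
      simp only [Function.comp]
      rw [show i + 1 + 1 + (t : Int) = i + 1 + ((t.succ : ℕ) : Int) from by push_cast; ring]

-- ===== VERDICT (by name: the statement is the Claim_ definition above) =====
theorem solve_spec : Claim_equal_solve := by
  intro n p_list _ hpre
  unfold Spec_solve
  unfold Pre_solve at hpre
  by_cases hn : 0 < n
  · have hdl : (pvBuild n p_list).toList.length = n.toNat := pvBuild_len n p_list
    simp only [solve, solve_alt]
    set a := pvBuild n p_list with ha
    set d := a.toList with hdd
    have had : a.toList = d := rfl
    have hnd : ((d.length : ℕ) : Int) = n := by rw [hdd, hdl]; omega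
    have hNpos : 0 < d.length := by omega
    rw [← hnd]
    -- B side: base and outer loop
    rw [pvEnumBase a d had,
        show ((d.length : ℕ) : Int) + 1 = 0 + 1 + ((d.length : ℕ) : Int) from by ring]
    -- A side: parity split
    by_cases he : PySem.Int.mod ((d.length : ℕ) : Int) 2 = 0
    · rw [if_pos he]
      have hm2 : d.length % 2 = 0 := by
        rw [PySem.Int.mod_eq_emod_of_pos (by omega)] at he
        exact_mod_cast he
      set M := d.length / 2 with hMdef
      have hM : d.length = 2 * M := by omega
      have hfd : PySem.Int.floordiv ((d.length : ℕ) : Int) 2 = ((M : ℕ) : Int) := by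
        rw [PySem.Int.floordiv_eq_ediv_of_pos (by omega), hMdef]
        exact_mod_cast (Int.natCast_ediv d.length 2).symm
      rw [hfd, pvR0E a d had M hM]
      have hd0 : (PySem.List.slice d none (some ((M : ℕ) : Int))).sum = pvW d M 0 := by
        rw [PySem.List.slice_to_natCast d M]
        exact pvTake_sum d M (by omega)
      rw [hd0]
      have hadj : ∀ i : Int,
          pvWsum (pvPref a) (d.length : Int) (PySem.Int.mod (1 - (i + 1)) (d.length : Int))
              (PySem.Int.floordiv ((d.length : Int) + 1) 2)
            + pvWsum (pvPref a) (d.length : Int) (PySem.Int.mod (1 - (i + 1)) (d.length : Int))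
              (PySem.Int.floordiv (d.length : Int) 2)
            = pvC d (-(i + 1)) - pvC d (-i) + d.sum := by
        intro i
        have h0N : (0 : Int) < (d.length : Int) := by omega
        have hfd1 : PySem.Int.floordiv ((d.length : Int) + 1) 2 = ((M : ℕ) : Int) := by
          rw [PySem.Int.floordiv_eq_ediv_of_pos (by omega)]
          omega
        have hfd2 : PySem.Int.floordiv ((d.length : Int)) 2 = ((M : ℕ) : Int) := by
          rw [PySem.Int.floordiv_eq_ediv_of_pos (by omega)]
          omega
        rw [hfd1, hfd2, show (1 : Int) - (i + 1) = -i from by ring]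
        rw [pvWsum_spec (pvPref a) a d had rfl
              (PySem.Int.mod (-i) (d.length : Int)) ((M : ℕ) : Int)
              (PySem.Int.mod_nonneg _ h0N) (PySem.Int.mod_lt _ h0N)
              (by positivity) (by omega)]
        rw [Int.toNat_natCast]
        have hsum : (∑ x ∈ Finset.range M,
            pvDp d (PySem.Int.mod (-i) (d.length : Int) + (x : Int))) = pvW d M i := by
          unfold pvW
          refine Finset.sum_congr rfl (fun x _ => ?_)
          apply pvDp_congr
          rw [PySem.Int.mod_eq_emod_of_pos h0N, Int.add_emod, Int.emod_emod_of_dvd _ dvd_rfl,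
              ← Int.add_emod, show -i + (x : Int) = (x : Int) - i from by ring]
        rw [hsum]
        linear_combination (-1 : Int) * pvDeltaE d M hM hNpos i
      have hloop := pvLoopE a d had M hM hNpos d.length 0 (pvC d 0) le_rfl
      simp only [neg_zero, zero_mul, add_zero, zero_add] at hloop
      rw [hloop]
      have hloopB := pvLoopB (pvPref a) d hadj d.length 0 (pvC d 0) le_rfl
      simp only [neg_zero, zero_mul, add_zero, zero_add] at hloopB
      rw [show (0 : Int) + 1 + ((d.length : ℕ) : Int) = 1 + ((d.length : ℕ) : Int) from by ring]
      rw [hloopB]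
    · rw [if_neg he]
      have hm2 : d.length % 2 = 1 := by
        rw [PySem.Int.mod_eq_emod_of_pos (by omega)] at he
        omega
      set M := d.length / 2 with hMdef
      have hM : d.length = 2 * M + 1 := by omega
      have hfd : PySem.Int.floordiv ((d.length : ℕ) : Int) 2 = ((M : ℕ) : Int) := by
        rw [PySem.Int.floordiv_eq_ediv_of_pos (by omega), hMdef]
        exact_mod_cast (Int.natCast_ediv d.length 2).symm
      rw [hfd, pvR0O a d had M hM]
      have hd0 : 2 * (PySem.List.slice d none (some ((M : ℕ) : Int))).sum
          + a.getD (((M : ℕ) : Int)).toNat 0 = 2 * pvW d M 0 + pvDp d (M : Int) := by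
        rw [PySem.List.slice_to_natCast d M,
            pvTake_sum d M (by omega), pvAget_nat a d had,
            pvDp_natCast d M (by omega)]
      rw [hd0]
      have hadj : ∀ i : Int,
          pvWsum (pvPref a) (d.length : Int) (PySem.Int.mod (1 - (i + 1)) (d.length : Int))
              (PySem.Int.floordiv ((d.length : Int) + 1) 2)
            + pvWsum (pvPref a) (d.length : Int) (PySem.Int.mod (1 - (i + 1)) (d.length : Int))
              (PySem.Int.floordiv (d.length : Int) 2)
            = pvC d (-(i + 1)) - pvC d (-i) + d.sum := by
        intro i
        have h0N : (0 : Int) < (d.length : Int) := by omega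
        have hfd1 : PySem.Int.floordiv ((d.length : Int) + 1) 2 = ((M + 1 : ℕ) : Int) := by
          rw [PySem.Int.floordiv_eq_ediv_of_pos (by omega)]
          omega
        have hfd2 : PySem.Int.floordiv ((d.length : Int)) 2 = ((M : ℕ) : Int) := by
          rw [PySem.Int.floordiv_eq_ediv_of_pos (by omega)]
          omega
        rw [hfd1, hfd2, show (1 : Int) - (i + 1) = -i from by ring]
        rw [pvWsum_spec (pvPref a) a d had rfl
              (PySem.Int.mod (-i) (d.length : Int)) ((M + 1 : ℕ) : Int)
              (PySem.Int.mod_nonneg _ h0N) (PySem.Int.mod_lt _ h0N)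
              (by positivity) (by omega),
            pvWsum_spec (pvPref a) a d had rfl
              (PySem.Int.mod (-i) (d.length : Int)) ((M : ℕ) : Int)
              (PySem.Int.mod_nonneg _ h0N) (PySem.Int.mod_lt _ h0N)
              (by positivity) (by omega)]
        rw [Int.toNat_natCast, Int.toNat_natCast]
        have hcong : ∀ x : ℕ,
            pvDp d (PySem.Int.mod (-i) (d.length : Int) + (x : Int)) = pvDp d ((x : Int) - i) := by
          intro x
          apply pvDp_congr
          rw [PySem.Int.mod_eq_emod_of_pos h0N, Int.add_emod, Int.emod_emod_of_dvd _ dvd_rfl,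
              ← Int.add_emod, show -i + (x : Int) = (x : Int) - i from by ring]
        have hsum : (∑ x ∈ Finset.range M,
            pvDp d (PySem.Int.mod (-i) (d.length : Int) + (x : Int))) = pvW d M i := by
          unfold pvW
          exact Finset.sum_congr rfl (fun x _ => hcong x)
        have hsum1 : (∑ x ∈ Finset.range (M + 1),
            pvDp d (PySem.Int.mod (-i) (d.length : Int) + (x : Int)))
            = pvW d M i + pvDp d ((M : Int) - i) := by
          rw [Finset.sum_range_succ, hsum, hcong M]
        rw [hsum1, hsum]
        linear_combination (-1 : Int) * pvDeltaO d M hM hNpos i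
      have hloop := pvLoopO a d had M hM hNpos d.length 0 (pvC d 0) le_rfl
      simp only [neg_zero, zero_mul, add_zero, zero_add, sub_zero] at hloop
      rw [hloop]
      have hloopB := pvLoopB (pvPref a) d hadj d.length 0 (pvC d 0) le_rfl
      simp only [neg_zero, zero_mul, add_zero, zero_add] at hloopB
      rw [show (0 : Int) + 1 + ((d.length : ℕ) : Int) = 1 + ((d.length : ℕ) : Int) from by ring]
      rw [hloopB]
  · have hdeg : p_list = [] ∧ n % 2 = 0 := by
      rcases hpre with h | h
      · omega
      · exact h
    obtain ⟨hp, he2⟩ := hdeg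
    subst hp
    have hdnil : pvBuild n [] = #[] := by
      unfold pvBuild
      rw [PySem.List.enumerate_nil, List.foldl_nil,
          Int.toNat_of_nonpos (by omega), Array.replicate_zero]
    simp only [solve, solve_alt, hdnil]
    rw [if_pos (show PySem.Int.mod n 2 = 0 by
      rw [PySem.Int.mod_eq_emod_of_pos (by omega)]; exact he2)]
    rw [PySem.Int.floordiv_eq_ediv_of_pos (by omega)]
    rw [PySem.List.pyRange_one_eq_nil (show n / 2 ≤ 0 by omega),
        PySem.List.pyRange_one_eq_nil (show n ≤ n / 2 by omega),
        PySem.List.pyRange_one_eq_nil (show n ≤ 0 by omega),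
        PySem.List.pyRange_one_eq_nil (show n + 1 ≤ 1 by omega)]
    simp
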